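-- pv_equiv track=rewrite | github.com/akamai/cli-eaa | libeaa/reporting.py | split_time_range
-- ===== SOURCE A (Python) =====
-- def split_time_range(start, end, num_sub_ranges):
--     if num_sub_ranges <= 0:
--         raise ValueError("Number of sub-ranges must be greater than zero")
--     if start >= end:
--         raise ValueError("End time must be greater than start time")
--
--     total_duration = end - start
--     sub_range_duration = total_duration // num_sub_ranges
--     remainder = total_duration % num_sub_ranges
--
--     sub_ranges = []
--     current_start = start
--
--     for i in range(num_sub_ranges):
--         current_end = current_start + sub_range_duration
--         if remainder > 0:
--             current_end += 1
--             remainder -= 1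
--         sub_ranges.append((current_start, current_end))
--         current_start = current_end
--
--     return sub_ranges
-- ===== SOURCE B (Python) =====
-- def split_time_range(start, end, num_sub_ranges):
--     if num_sub_ranges <= 0:
--         raise ValueError("Number of sub-ranges must be greater than zero")
--     if start >= end:
--         raise ValueError("End time must be greater than start time")
--     q, r = divmod(end - start, num_sub_ranges)
--     return [(start + i * q + min(i, r), start + (i + 1) * q + min(i + 1, r))
--             for i in range(num_sub_ranges)]
-- ===== Notes on version B (the rewrite author's own statement) =====
-- stated objective: alternative
-- what changed: Replaces the running current_start accumulator and mutable remainder counter with a closed-form per-index computation: each boundary is start + i*q + min(i, r) with q, r from one divmod.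
import Mathlib
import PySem

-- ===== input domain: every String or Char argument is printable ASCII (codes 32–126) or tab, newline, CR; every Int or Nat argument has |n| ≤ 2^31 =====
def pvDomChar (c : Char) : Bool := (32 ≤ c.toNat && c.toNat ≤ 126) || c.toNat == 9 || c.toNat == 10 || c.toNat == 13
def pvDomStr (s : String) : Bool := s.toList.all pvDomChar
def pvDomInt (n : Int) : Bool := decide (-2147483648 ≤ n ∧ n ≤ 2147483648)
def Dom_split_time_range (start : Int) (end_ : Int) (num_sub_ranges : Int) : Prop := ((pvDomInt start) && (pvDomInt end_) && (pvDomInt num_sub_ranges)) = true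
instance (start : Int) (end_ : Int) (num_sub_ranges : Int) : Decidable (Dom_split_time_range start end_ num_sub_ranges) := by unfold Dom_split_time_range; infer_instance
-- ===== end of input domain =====

-- B replaces A's running accumulator/remainder loop with a closed-form per-index boundary formula (alternative decomposition, same cost).


-- ===== PORT A =====
-- literal transliteration of A: running current_start, mutable remainder, append per iteration
def split_time_range (start : Int) (end_ : Int) (num_sub_ranges : Int) : List (Int × Int) :=
  let total_duration := end_ - start
  let sub_range_duration := PySem.Int.floordiv total_duration num_sub_ranges
  let remainder0 := PySem.Int.mod total_duration num_sub_ranges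
  let final := (PySem.List.pyRange 0 num_sub_ranges 1).foldl
    (fun (st : List (Int × Int) × Int × Int) _ =>
      let current_start := st.2.1
      let remainder := st.2.2
      let current_end := current_start + sub_range_duration
      let current_end := if remainder > 0 then current_end + 1 else current_end
      let remainder := if remainder > 0 then remainder - 1 else remainder
      (st.1 ++ [(current_start, current_end)], current_end, remainder))
    ([], start, remainder0)
  final.1

-- ===== PORT B =====
-- literal transliteration of B: one divmod, then each pair computed independently from its index
def split_time_range_alt (start : Int) (end_ : Int) (num_sub_ranges : Int) : List (Int × Int) :=
  let q := PySem.Int.floordiv (end_ - start) num_sub_ranges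
  let r := PySem.Int.mod (end_ - start) num_sub_ranges
  (PySem.List.pyRange 0 num_sub_ranges 1).map
    (fun i => (start + i * q + min i r, start + (i + 1) * q + min (i + 1) r))

-- ===== PRECONDITION & SPEC =====
-- A raises ValueError when num_sub_ranges ≤ 0 or start ≥ end; exactly those inputs are excluded.
def Pre_split_time_range (start : Int) (end_ : Int) (num_sub_ranges : Int) : Prop :=
  0 < num_sub_ranges ∧ start < end_
instance (start : Int) (end_ : Int) (num_sub_ranges : Int) : Decidable (Pre_split_time_range start end_ num_sub_ranges) := by unfold Pre_split_time_range; infer_instance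
def pvWitness_split_time_range : Int × Int × Int := (0, 10, 3)
def Spec_split_time_range (start : Int) (end_ : Int) (num_sub_ranges : Int) (out : List (Int × Int)) : Prop := out = split_time_range_alt start end_ num_sub_ranges
instance (start : Int) (end_ : Int) (num_sub_ranges : Int) (out : List (Int × Int)) : Decidable (Spec_split_time_range start end_ num_sub_ranges out) := by unfold Spec_split_time_range; infer_instance

-- ===== CLAIM (what is proved, stated in full; the proofs are below) =====
def Claim_equal_split_time_range : Prop := ∀ (start : Int) (end_ : Int) (num_sub_ranges : Int), Dom_split_time_range start end_ num_sub_ranges → Pre_split_time_range start end_ num_sub_ranges → Spec_split_time_range start end_ num_sub_ranges (split_time_range start end_ num_sub_ranges)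

-- ===== LEMMAS AND PROOFS =====

-- loop invariant: after k iterations, the accumulated list is B's first k pairs,
-- current_start = s + k*q + min k r, remainder = r - min k r
theorem split_loop_inv (q r s : Int) (hr : 0 ≤ r) (k : Nat) :
    (PySem.List.pyRange 0 (k : Int) 1).foldl
      (fun (st : List (Int × Int) × Int × Int) _ =>
        let current_start := st.2.1
        let remainder := st.2.2
        let current_end := current_start + q
        let current_end := if remainder > 0 then current_end + 1 else current_end
        let remainder := if remainder > 0 then remainder - 1 else remainder
        (st.1 ++ [(current_start, current_end)], current_end, remainder))
      ([], s, r)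
    = ((PySem.List.pyRange 0 (k : Int) 1).map
        (fun i => (s + i * q + min i r, s + (i + 1) * q + min (i + 1) r)),
       s + k * q + min (k : Int) r, r - min (k : Int) r) := by
  induction k with
  | zero =>
    simp [PySem.List.pyRange_one_eq_nil]
    omega
  | succ k ih =>
    have hsplit : PySem.List.pyRange 0 ((k + 1 : Nat) : Int) 1
        = PySem.List.pyRange 0 (k : Int) 1 ++ [(k : Int)] := by
      push_cast
      exact PySem.List.pyRange_one_succ_right (by exact_mod_cast Int.natCast_nonneg k)
    rw [hsplit, List.foldl_append, List.map_append, ih]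
    push_cast
    simp only [List.foldl_cons, List.foldl_nil, List.map_cons, List.map_nil]
    by_cases hk : (k : Int) < r
    · have h1 : min (k : Int) r = (k : Int) := by omega
      have h2 : min ((1 : Int) + (k : Int)) r = 1 + (k : Int) := by omega
      have h2' : min ((k : Int) + 1) r = (k : Int) + 1 := by omega
      simp only [h1, h2']
      have hpos : r - (k : Int) > 0 := by omega
      simp only [hpos, if_pos, Prod.mk.injEq]
      refine ⟨?_, by ring, by ring⟩
      congr 1
      simp only [List.cons.injEq, Prod.mk.injEq]
      exact ⟨⟨by trivial, by ring⟩, by trivial⟩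
    · have h1 : min (k : Int) r = r := by omega
      have h2 : min ((1 : Int) + (k : Int)) r = r := by omega
      have h2' : min ((k : Int) + 1) r = r := by omega
      simp only [h1, h2']
      have hnpos : ¬ (r - r > 0) := by omega
      simp only [hnpos, if_false, Prod.mk.injEq]
      refine ⟨?_, by ring, by trivial⟩
      congr 1
      simp only [List.cons.injEq, Prod.mk.injEq]
      exact ⟨⟨by trivial, by ring⟩, by trivial⟩

-- ===== VERDICT (by name: the statement is the Claim_ definition above) =====
theorem split_time_range_spec : Claim_equal_split_time_range := by
  intro start end_ n _hdom hpre
  obtain ⟨hn, _hlt⟩ := hpre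
  unfold Spec_split_time_range split_time_range split_time_range_alt
  have hr : 0 ≤ PySem.Int.mod (end_ - start) n := by
    rw [PySem.Int.mod_eq_emod_of_pos hn]
    exact Int.emod_nonneg _ (by omega)
  have hcast : ((n.toNat : Int)) = n := Int.toNat_of_nonneg (le_of_lt hn)
  have := split_loop_inv (PySem.Int.floordiv (end_ - start) n)
    (PySem.Int.mod (end_ - start) n) start hr n.toNat
  rw [hcast] at this
  simp only [this]
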